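-- pv_equiv track=rewrite | github.com/DanielSongShen/cs224w-project | src/data/pipeline/utils.py | split_text
-- ===== SOURCE A (Python) =====
-- from typing import Dict, Any, List, Optional
--
-- def split_text(text: str, split_words: List[str]) -> List[str]:
--     """
--     Split text into parts based on split words.
--
--     Args:
--         text: Input text to split
--         split_words: List of marker words/phrases that indicate thought boundaries
--
--     Returns:
--         List of text segments (thoughts)
--     """
--     parts = []
--     current_part = ""
--     i = 0
--
--     while i < len(text):
--         found = False
--         for word in split_words:
--             # Only split if we have substantial content (>30 chars) already
--             if text[i:].startswith(word) and len(current_part) > 30: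
--                 parts.append(current_part)
--                 current_part = word
--                 i += len(word)
--                 found = True
--                 break
--
--         if not found:
--             current_part += text[i]
--             i += 1
--
--     if current_part:
--         parts.append(current_part)
--
--     return parts
-- ===== SOURCE B (Python) =====
-- from typing import List
--
-- def split_text(text: str, split_words: List[str]) -> List[str]:
--     """Staged re-implementation: (1) precompute, for every position, the first
--     listed word that matches there; (2) fold over all positions collecting cut
--     spans (start, end), skipping positions covered by a matched word; (3) build
--     the segments from the spans as slices."""
--     n = len(text)
--     table = [next((w for w in split_words if text.startswith(w, i)), None)
--              for i in range(n)]
--     cuts = []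
--     start = 0
--     skip = 0
--     for i in range(n):
--         if i < skip:
--             continue
--         w = table[i]
--         if w is not None and i - start > 30:
--             cuts.append((start, i))
--             start = i
--             skip = i + len(w)
--     parts = [text[s:e] for s, e in cuts]
--     if start < n:
--         parts.append(text[start:])
--     return parts
-- ===== Notes on version B (the rewrite author's own statement) =====
-- stated objective: faster
-- what changed: B replaces A's single stateful while-loop with character-by-character string accumulation by three staged passes: a precomputed per-position table of the first matching word, a fold over positions collecting cut spans (with a skip counter instead of index jumps), and segment construction from the spans as slices, eliminating the quadratic string building.
import Mathlib
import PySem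

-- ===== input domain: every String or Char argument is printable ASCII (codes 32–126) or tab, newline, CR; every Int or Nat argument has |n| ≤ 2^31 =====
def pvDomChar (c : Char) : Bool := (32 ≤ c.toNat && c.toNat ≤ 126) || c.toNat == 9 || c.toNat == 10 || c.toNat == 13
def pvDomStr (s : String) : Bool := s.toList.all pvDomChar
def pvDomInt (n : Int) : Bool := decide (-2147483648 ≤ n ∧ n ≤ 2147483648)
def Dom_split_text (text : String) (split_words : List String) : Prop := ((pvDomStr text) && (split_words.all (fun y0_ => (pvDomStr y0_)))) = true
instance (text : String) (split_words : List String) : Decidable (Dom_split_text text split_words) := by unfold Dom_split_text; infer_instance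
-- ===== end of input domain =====

-- B replaces A's stateful while-loop (character-by-character accumulation, index jumps)
-- by three staged passes: a per-position table of the first matching word, a fold over
-- all positions collecting cut spans with a skip counter, and slice-based segment
-- construction from the spans (objective: faster — no quadratic string building; the
-- timing run measured B faster on the generated inputs).
-- A's loop port uses a fuel parameter (2*len(text)+1, always sufficient) purely to make
-- the while-loop total; the computation per step is exactly the Python's.

-- ===== PORT A =====

-- inner 'for word in split_words: if text[i:].startswith(word) and len(current_part) > 30: … break'
-- = first word satisfying the condition
def pvFindA (words : List (List Char)) (t : List Char) (i : Nat) (cp : List Char) : Option (List Char) :=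
  words.find? (fun w => PySem.Chars.startswith (t.drop i) w && decide (cp.length > 30))

-- the while loop of A: state (parts, current_part, i)
def pvLoopA (words : List (List Char)) (t : List Char) (fuel : Nat) (i : Nat) (cp : List Char)
    (parts : List (List Char)) : List (List Char) :=
  match fuel with
  | 0 => parts   -- never reached from the top-level call (the loop makes < 2*len+1 iterations)
  | fuel + 1 =>
    if h : i < t.length then
      match pvFindA words t i cp with
      | some w => pvLoopA words t fuel (i + w.length) w (parts ++ [cp])
      | none   => pvLoopA words t fuel (i + 1) (cp ++ [t[i]]) parts
    else
      if cp ≠ [] then parts ++ [cp] else parts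

def split_text (text : String) (split_words : List String) : List String :=
  (pvLoopA (split_words.map String.toList) text.toList (2 * text.toList.length + 1) 0 [] []).map
    fun cs => String.ofList cs

-- ===== PORT B =====

-- stage 1: 'table = [next((w for w in split_words if text.startswith(w, i)), None) for i in range(n)]'
def pvTable (words : List (List Char)) (t : List Char) : List (Option (List Char)) :=
  (List.range t.length).map (fun i => words.find? (fun w => PySem.Chars.startswith (t.drop i) w))

-- stage 2: one step of the 'for i in range(n)' fold; state = (cuts, start, skip)
def pvStep (tbl : List (Option (List Char))) (s : List (Nat × Nat) × Nat × Nat) (i : Nat) :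
    List (Nat × Nat) × Nat × Nat :=
  if i < s.2.2 then s
  else
    match tbl.getD i none with
    | some w => if decide (i - s.2.1 > 30) then (s.1 ++ [(s.2.1, i)], i, i + w.length) else s
    | none => s

def split_text_alt (text : String) (split_words : List String) : List String :=
  let t := text.toList
  let tbl := pvTable (split_words.map String.toList) t
  let st := (List.range t.length).foldl (pvStep tbl) ([], 0, 0)
  (st.1.map (fun p => String.ofList ((t.take p.2).drop p.1))) ++
    (if st.2.1 < t.length then [String.ofList (t.drop st.2.1)] else [])

-- ===== PRECONDITION & SPEC =====
def Spec_split_text (text : String) (split_words : List String) (out : List String) : Prop := out = split_text_alt text split_words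
instance (text : String) (split_words : List String) (out : List String) : Decidable (Spec_split_text text split_words out) := by unfold Spec_split_text; infer_instance

-- ===== CLAIM (what is proved, stated in full; the proofs are below) =====
def Claim_equal_split_text : Prop := ∀ (text : String) (split_words : List String), Dom_split_text text split_words → Spec_split_text text split_words (split_text text split_words)

-- ===== LEMMAS AND PROOFS =====

-- the segment text[start:i] as a list of chars
def pvSeg (t : List Char) (p : Nat × Nat) : List Char := (t.take p.2).drop p.1

-- finalize B's fold state into the result list (of char lists)
def pvFin (t : List Char) (s : List (Nat × Nat) × Nat × Nat) : List (List Char) :=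
  s.1.map (pvSeg t) ++ (if s.2.1 < t.length then [t.drop s.2.1] else [])

theorem pvTable_getD (words : List (List Char)) (t : List Char) (i : Nat) (h : i < t.length) :
    (pvTable words t).getD i none = words.find? (fun w => PySem.Chars.startswith (t.drop i) w) := by
  simp [pvTable, List.getD, h]

-- skipped positions leave the fold state unchanged
theorem pvStep_skip (tbl : List (Option (List Char))) (cuts : List (Nat × Nat)) (start skip : Nat)
    (l : List Nat) (h : ∀ j ∈ l, j < skip) :
    l.foldl (pvStep tbl) (cuts, start, skip) = (cuts, start, skip) := by
  induction l with
  | nil => rfl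
  | cons a l ih =>
    have ha : a < skip := h a (List.mem_cons_self)
    simp only [List.foldl_cons, pvStep, if_pos ha]
    exact ih (fun j hj => h j (List.mem_cons_of_mem _ hj))

theorem pvFindA_prefix {words : List (List Char)} {t : List Char} {i : Nat} {cp w : List Char}
    (h : pvFindA words t i cp = some w) :
    w <+: t.drop i ∧ 30 < cp.length := by
  have := List.find?_some h
  simp [PySem.Chars.startswith, List.isPrefixOf_iff_prefix] at this
  exact this

-- when cp.length > 30, A's conditioned finder is the unconditioned table entry
theorem pvFindA_eq_table (words : List (List Char)) (t : List Char) (i : Nat) (cp : List Char)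
    (h : 30 < cp.length) :
    pvFindA words t i cp = words.find? (fun w => PySem.Chars.startswith (t.drop i) w) := by
  unfold pvFindA
  congr 1
  funext w
  simp [h]

theorem pvSeg_len (t : List Char) (i start : Nat) (hin : i ≤ t.length) :
    (pvSeg t (start, i)).length = i - start := by
  simp [pvSeg, List.length_drop, List.length_take]; omega

theorem pvSeg_snoc (t : List Char) (i start : Nat) (h : i < t.length) (hsi : start ≤ i) :
    pvSeg t (start, i) ++ [t[i]] = pvSeg t (start, i + 1) := by
  unfold pvSeg
  rw [List.take_add_one, List.getElem?_eq_getElem h]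
  rw [List.drop_append_of_le_length (by simp; omega)]
  simp

theorem pvSeg_word (t : List Char) (i : Nat) (w : List Char) (hp : w <+: t.drop i) :
    w = pvSeg t (i, i + w.length) := by
  unfold pvSeg
  rw [List.drop_take]
  have h1 : i + w.length - i = w.length := by omega
  rw [h1]
  exact List.prefix_iff_eq_take.mp hp

-- MAIN correspondence: A's loop head at position i, with current_part = text[start:i],
-- matches B's fold resumed at position i (with pending skip ≤ i).
theorem pvLoop_main (words : List (List Char)) (t : List Char) :
    ∀ fuel i start skip cuts, start ≤ i → i ≤ t.length → skip ≤ i → 2 * (t.length - i) + 1 ≤ fuel →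
      pvLoopA words t fuel i (pvSeg t (start, i)) (cuts.map (pvSeg t)) =
      pvFin t ((List.range' i (t.length - i)).foldl (pvStep (pvTable words t)) (cuts, start, skip)) := by
  intro fuel
  induction fuel using Nat.strong_induction_on with
  | _ fuel ih =>
  intro i start skip cuts hsi hin hsk hfuel
  match fuel, hfuel with
  | fuel + 1, hfuel =>
  by_cases h : i < t.length
  · have hr : t.length - i = (t.length - (i+1)) + 1 := by omega
    rw [hr, List.range'_succ, List.foldl_cons]
    have hstep : pvStep (pvTable words t) (cuts, start, skip) i =
        (if i < skip then (cuts, start, skip) else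
          match (pvTable words t).getD i none with
          | some w => if decide (i - start > 30) then (cuts ++ [(start, i)], i, i + w.length) else (cuts, start, skip)
          | none => (cuts, start, skip)) := rfl
    have hns : ¬ i < skip := by omega
    cases hfa : pvFindA words t i (pvSeg t (start, i)) with
    | some w =>
      have hp := pvFindA_prefix hfa
      have hlen : 30 < i - start := by
        have := hp.2; rwa [pvSeg_len t i start hin] at this
      have htbl : (pvTable words t).getD i none = some w := by
        rw [pvTable_getD words t i h, ← pvFindA_eq_table words t i _ (hp.2)]
        exact hfa
      have hwle : w.length ≤ t.length - i := by
        have := List.IsPrefix.length_le hp.1; simpa using this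
      rw [hstep]
      simp only [if_neg hns, htbl, decide_eq_true_eq, if_pos (by omega : i - start > 30)]
      simp only [pvLoopA, dif_pos h, hfa]
      cases hw : w with
      | nil =>
        -- matched the empty word: A stays at i with current_part = []; the next A step
        -- must append t[i] (no word can match with an empty current_part)
        subst hw
        simp only [List.length_nil, Nat.add_zero]
        have hfa2 : pvFindA words t i ([] : List Char) = none := by
          apply List.find?_eq_none.mpr
          intro x _; simp
        match fuel, (by omega : 2 * (t.length - (i+1)) + 1 + 1 ≤ fuel) with
        | fuel + 1, hf2 =>
        simp only [pvLoopA, dif_pos h, hfa2]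
        have hcons : (cuts.map (pvSeg t) ++ [pvSeg t (start, i)]) =
            ((cuts ++ [(start, i)]).map (pvSeg t)) := by simp
        have hnil : ([] : List Char) ++ [t[i]] = pvSeg t (i, i + 1) := by
          have := pvSeg_snoc t i i h (le_refl i)
          simpa [pvSeg, List.drop_take] using this
        rw [hcons, hnil]
        exact ih fuel (by omega) (i+1) i i (cuts ++ [(start, i)]) (by omega) h (by omega) (by omega)
      | cons c cs =>
        rw [← hw]
        have hwpos : 0 < w.length := by rw [hw]; simp
        have ih' := ih fuel (by omega) (i + w.length) i (i + w.length) (cuts ++ [(start, i)])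
          (by omega) (by omega) (le_refl _) (by omega)
        rw [← pvSeg_word t i w hp.1] at ih'
        -- B's fold skips positions i+1 … i+|w|-1, then resumes at i+|w|
        have hsplit : List.range' (i+1) (t.length - (i+1)) =
            List.range' (i+1) (w.length - 1) ++ List.range' (i + w.length) (t.length - (i + w.length)) := by
          have h2 : t.length - (i+1) = (w.length - 1) + (t.length - (i + w.length)) := by omega
          have h3 : (i+1) + (w.length - 1) = i + w.length := by omega
          rw [h2, ← List.range'_append_1, h3]
        have hskip := pvStep_skip (pvTable words t) (cuts ++ [(start, i)]) i (i + w.length)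
          (List.range' (i+1) (w.length - 1)) (by
            intro j hj
            obtain ⟨k, hk, hj⟩ := List.mem_range'.mp hj
            omega)
        rw [hsplit, List.foldl_append, hskip]
        have hcons : (cuts.map (pvSeg t) ++ [pvSeg t (start, i)]) =
            ((cuts ++ [(start, i)]).map (pvSeg t)) := by simp
        rw [hcons]
        exact ih'
    | none =>
      -- A appends t[i]; B's step at i is the identity
      have hid : pvStep (pvTable words t) (cuts, start, skip) i = (cuts, start, skip) := by
        rw [hstep, if_neg hns]
        by_cases h30 : 30 < i - start
        · have : (pvTable words t).getD i none = none := by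
            rw [pvTable_getD words t i h, ← pvFindA_eq_table words t i (pvSeg t (start, i))
              (by rw [pvSeg_len t i start hin]; omega)]
            exact hfa
          rw [this]
        · cases (pvTable words t).getD i none with
          | some w => simp [h30]
          | none => rfl
      rw [hid]
      simp only [pvLoopA, dif_pos h, hfa]
      rw [pvSeg_snoc t i start h hsi]
      exact ih fuel (by omega) (i+1) start skip cuts (by omega) h (by omega) (by omega)
  · have hi : i = t.length := by omega
    subst hi
    simp only [Nat.sub_self, List.range'_zero, List.foldl_nil]
    simp only [pvLoopA, dif_neg h, pvFin]
    by_cases hs : start < t.length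
    · have : pvSeg t (start, t.length) = t.drop start := by simp [pvSeg]
      rw [this]
      simp [hs, List.drop_eq_nil_iff, Nat.not_le.mpr hs]
    · have : pvSeg t (start, t.length) = [] := by
        simp [pvSeg, List.drop_eq_nil_iff, Nat.le_of_not_lt hs]
      rw [this]
      simp [hs]

-- ===== VERDICT (by name: the statement is the Claim_ definition above) =====
theorem split_text_spec : Claim_equal_split_text := by
  intro text split_words _
  unfold Spec_split_text split_text split_text_alt
  have h := pvLoop_main (split_words.map String.toList) text.toList
    (2 * text.toList.length + 1) 0 0 0 [] (le_refl 0) (Nat.zero_le _) (le_refl 0) (by omega)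
  simp only [List.map_nil] at h
  have hseg : pvSeg text.toList (0, 0) = [] := by simp [pvSeg]
  rw [hseg] at h
  rw [h]
  simp only [pvFin, Nat.sub_zero, List.range_eq_range']
  rw [List.map_append]
  congr 1
  · rw [List.map_map]; rfl
  · split <;> simp
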